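-- pv_equiv track=rewrite | github.com/atldaveo/aoc-24 | day02/main.py | analyze_report
-- ===== SOURCE A (Python) =====
-- def analyze_report(level):
--     report_status = 0               # 1 is safe, 0 is unsafe
--     is_increasing = True
--     is_decreasing = True
--
-- # Test if the report is increasing properly
--     for i in range(len(level) - 1):
--         if not (level[i] < level[i + 1] and 1 <= (level[i + 1] - level[i]) <= 3):   # Is the report strictly increasing by 3 or less?
--             is_increasing = False
--             break
--
-- # Test if the report is decreasing properly
--     for i in range(len(level) - 1):
--         if not (level[i] > level[i + 1] and 1 <= (level[i] - level[i + 1]) <= 3):   # Is the report strictly decreasing by 3 or less?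
--             is_decreasing = False
--             break
--
-- # Is the report safe or not?
--     if is_increasing or is_decreasing:
--         report_status = 1
--     else:
--         report_status = 0
--
--     return report_status
-- ===== SOURCE B (Python) =====
-- def analyze_report(level):
--     # Single pass: track the min and max adjacent difference, judge once at the end.
--     # Safe-increasing iff min diff >= 1 and max diff <= 3;
--     # safe-decreasing iff min diff >= -3 and max diff <= -1.
--     if len(level) < 2:
--         return 1
--     lo = hi = level[1] - level[0]
--     for i in range(2, len(level)):
--         d = level[i] - level[i - 1]
--         if d < lo:
--             lo = d
--         if d > hi:
--             hi = d
--     return 1 if (1 <= lo and hi <= 3) or (-3 <= lo and hi <= -1) else 0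
-- ===== Notes on version B (the rewrite author's own statement) =====
-- stated objective: alternative
-- what changed: B makes one pass maintaining only the minimum and maximum adjacent difference and decides safety with a single range test on those two extremes, instead of A's two separate boolean break-loops re-scanning the list.
import Mathlib
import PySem

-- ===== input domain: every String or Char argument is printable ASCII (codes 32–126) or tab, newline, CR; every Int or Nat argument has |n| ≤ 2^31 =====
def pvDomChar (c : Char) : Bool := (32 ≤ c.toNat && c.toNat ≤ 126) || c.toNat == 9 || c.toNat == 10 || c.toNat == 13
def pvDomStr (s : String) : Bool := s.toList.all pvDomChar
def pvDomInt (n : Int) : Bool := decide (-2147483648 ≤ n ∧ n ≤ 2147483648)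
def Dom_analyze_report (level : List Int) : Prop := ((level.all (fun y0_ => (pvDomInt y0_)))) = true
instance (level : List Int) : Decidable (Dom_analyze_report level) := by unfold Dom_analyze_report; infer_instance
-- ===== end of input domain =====

-- B replaces A's two boolean break-loops by one pass tracking min/max adjacent difference; same value everywhere.

-- ===== PORT A =====
-- A's first loop: scan adjacent pairs, break (become false) at the first failing pair.
def incLoop : List Int → Bool
  | a :: b :: rest =>
      if ¬ (a < b ∧ 1 ≤ b - a ∧ b - a ≤ 3) then false else incLoop (b :: rest)
  | _ => true

-- A's second loop, same shape with the decreasing test.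
def decLoop : List Int → Bool
  | a :: b :: rest =>
      if ¬ (a > b ∧ 1 ≤ a - b ∧ a - b ≤ 3) then false else decLoop (b :: rest)
  | _ => true

def analyze_report (level : List Int) : Int :=
  let is_increasing := incLoop level
  let is_decreasing := decLoop level
  if is_increasing || is_decreasing then 1 else 0

-- ===== PORT B =====
-- B's single loop: carry previous element and the running (lo, hi) extremes of the diffs.
def mmLoop : Int → Int → Int → List Int → Int × Int
  | _, lo, hi, [] => (lo, hi)
  | prev, lo, hi, x :: rest =>
      let d := x - prev
      mmLoop x (if d < lo then d else lo) (if d > hi then d else hi) rest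

def analyze_report_alt (level : List Int) : Int :=
  match level with
  | a :: b :: rest =>
      let p := mmLoop b (b - a) (b - a) rest
      if (1 ≤ p.1 ∧ p.2 ≤ 3) ∨ (-3 ≤ p.1 ∧ p.2 ≤ -1) then 1 else 0
  | _ => 1

-- ===== PRECONDITION & SPEC =====
def Spec_analyze_report (level : List Int) (out : Int) : Prop := out = analyze_report_alt level
instance (level : List Int) (out : Int) : Decidable (Spec_analyze_report level out) := by unfold Spec_analyze_report; infer_instance

-- ===== CLAIM (what is proved, stated in full; the proofs are below) =====
def Claim_equal_analyze_report : Prop := ∀ (level : List Int), Dom_analyze_report level → Spec_analyze_report level (analyze_report level)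

-- ===== LEMMAS AND PROOFS =====
lemma inc_char (l : List Int) : ∀ (prev lo hi : Int),
    ((1 ≤ (mmLoop prev lo hi l).1 ∧ (mmLoop prev lo hi l).2 ≤ 3)
      ↔ (1 ≤ lo ∧ hi ≤ 3 ∧ incLoop (prev :: l) = true)) := by
  induction l with
  | nil => intro prev lo hi; simp [mmLoop, incLoop]
  | cons x rest ih =>
    intro prev lo hi
    simp only [mmLoop]
    rw [ih]
    rw [show incLoop (prev :: x :: rest)
          = (if ¬ (prev < x ∧ 1 ≤ x - prev ∧ x - prev ≤ 3) then false
             else incLoop (x :: rest)) from rfl]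
    by_cases h : prev < x ∧ 1 ≤ x - prev ∧ x - prev ≤ 3
    · rw [if_neg (not_not_intro h)]
      constructor
      · rintro ⟨h1, h2, h3⟩
        refine ⟨?_, ?_, h3⟩ <;> split_ifs at h1 h2 <;> omega
      · rintro ⟨h1, h2, h3⟩
        refine ⟨?_, ?_, h3⟩ <;> split_ifs <;> omega
    · rw [if_pos h]
      constructor
      · rintro ⟨h1, h2, _⟩
        exfalso; split_ifs at h1 h2 <;> omega
      · rintro ⟨_, _, h3⟩; simp at h3

lemma dec_char (l : List Int) : ∀ (prev lo hi : Int),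
    ((-3 ≤ (mmLoop prev lo hi l).1 ∧ (mmLoop prev lo hi l).2 ≤ -1)
      ↔ (-3 ≤ lo ∧ hi ≤ -1 ∧ decLoop (prev :: l) = true)) := by
  induction l with
  | nil => intro prev lo hi; simp [mmLoop, decLoop]
  | cons x rest ih =>
    intro prev lo hi
    simp only [mmLoop]
    rw [ih]
    rw [show decLoop (prev :: x :: rest)
          = (if ¬ (prev > x ∧ 1 ≤ prev - x ∧ prev - x ≤ 3) then false
             else decLoop (x :: rest)) from rfl]
    by_cases h : prev > x ∧ 1 ≤ prev - x ∧ prev - x ≤ 3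
    · rw [if_neg (not_not_intro h)]
      constructor
      · rintro ⟨h1, h2, h3⟩
        refine ⟨?_, ?_, h3⟩ <;> split_ifs at h1 h2 <;> omega
      · rintro ⟨h1, h2, h3⟩
        refine ⟨?_, ?_, h3⟩ <;> split_ifs <;> omega
    · rw [if_pos h]
      constructor
      · rintro ⟨h1, h2, _⟩
        exfalso; split_ifs at h1 h2 <;> omega
      · rintro ⟨_, _, h3⟩; simp at h3

-- ===== VERDICT (by name: the statement is the Claim_ definition above) =====
theorem analyze_report_spec : Claim_equal_analyze_report := by
  intro level _
  unfold Spec_analyze_report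
  match level with
  | [] => rfl
  | [_] => rfl
  | a :: b :: rest =>
    unfold analyze_report analyze_report_alt
    have hinc := inc_char rest b (b - a) (b - a)
    have hdec := dec_char rest b (b - a) (b - a)
    have eInc : incLoop (a :: b :: rest) = true
        ↔ (1 ≤ (mmLoop b (b - a) (b - a) rest).1 ∧ (mmLoop b (b - a) (b - a) rest).2 ≤ 3) := by
      rw [hinc]
      rw [show incLoop (a :: b :: rest)
            = (if ¬ (a < b ∧ 1 ≤ b - a ∧ b - a ≤ 3) then false
               else incLoop (b :: rest)) from rfl]
      by_cases h : (a < b ∧ 1 ≤ b - a ∧ b - a ≤ 3)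
      · rw [if_neg (not_not_intro h)]
        constructor
        · intro h3; exact ⟨by omega, by omega, h3⟩
        · rintro ⟨_, _, h3⟩; exact h3
      · rw [if_pos h]
        constructor
        · intro hf; simp at hf
        · rintro ⟨h1, h2, _⟩; exact absurd ⟨by omega, h1, h2⟩ h
    have eDec : decLoop (a :: b :: rest) = true
        ↔ (-3 ≤ (mmLoop b (b - a) (b - a) rest).1 ∧ (mmLoop b (b - a) (b - a) rest).2 ≤ -1) := by
      rw [hdec]
      rw [show decLoop (a :: b :: rest)
            = (if ¬ (a > b ∧ 1 ≤ a - b ∧ a - b ≤ 3) then false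
               else decLoop (b :: rest)) from rfl]
      by_cases h : (a > b ∧ 1 ≤ a - b ∧ a - b ≤ 3)
      · rw [if_neg (not_not_intro h)]
        constructor
        · intro h3; exact ⟨by omega, by omega, h3⟩
        · rintro ⟨_, _, h3⟩; exact h3
      · rw [if_pos h]
        constructor
        · intro hf; simp at hf
        · rintro ⟨h1, h2, _⟩; exact absurd ⟨by omega, by omega, by omega⟩ h
    show (if (incLoop (a :: b :: rest) || decLoop (a :: b :: rest)) = true then (1 : Int) else 0)
        = (if (1 ≤ (mmLoop b (b - a) (b - a) rest).1 ∧ (mmLoop b (b - a) (b - a) rest).2 ≤ 3)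
              ∨ (-3 ≤ (mmLoop b (b - a) (b - a) rest).1 ∧ (mmLoop b (b - a) (b - a) rest).2 ≤ -1)
           then (1 : Int) else 0)
    split_ifs with h1 h2 h3
    · rfl
    · exfalso
      rcases (Bool.or_eq_true _ _).mp h1 with h | h
      · exact h2 (Or.inl (eInc.mp h))
      · exact h2 (Or.inr (eDec.mp h))
    · exfalso
      apply h1
      rcases h3 with h | h
      · exact (Bool.or_eq_true _ _).mpr (Or.inl (eInc.mpr h))
      · exact (Bool.or_eq_true _ _).mpr (Or.inr (eDec.mpr h))
    · rfl
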